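-- pv_equiv track=rewrite | github.com/operoncao123/thesis-formatter | scripts/generate_school_audit_inline_notes.py | collect_later_duplicates
-- ===== SOURCE A (Python) =====
-- def collect_later_duplicates(items: list[tuple[int, str]]) -> dict[int, str]:
--     seen = set()
--     duplicates: dict[int, str] = {}
--     for index, label in items:
--         if label in seen:
--             duplicates[index] = label
--         else:
--             seen.add(label)
--     return duplicates
-- ===== SOURCE B (Python) =====
-- def collect_later_duplicates(items: list[tuple[int, str]]) -> dict[int, str]:
--     # For each position, a pair is a later duplicate iff its label already
--     # occurs somewhere in the strict prefix before it: no streaming seen-set.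
--     return {index: label
--             for i, (index, label) in enumerate(items)
--             if any(l == label for _, l in items[:i])}
-- ===== Notes on version B (the rewrite author's own statement) =====
-- stated objective: alternative
-- what changed: Replaces the streaming seen-set with incremental dict mutation by a single dict comprehension that keeps a pair iff its label occurs in the strict prefix items[:i], trading the maintained set state for a per-element prefix scan.
import Mathlib
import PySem

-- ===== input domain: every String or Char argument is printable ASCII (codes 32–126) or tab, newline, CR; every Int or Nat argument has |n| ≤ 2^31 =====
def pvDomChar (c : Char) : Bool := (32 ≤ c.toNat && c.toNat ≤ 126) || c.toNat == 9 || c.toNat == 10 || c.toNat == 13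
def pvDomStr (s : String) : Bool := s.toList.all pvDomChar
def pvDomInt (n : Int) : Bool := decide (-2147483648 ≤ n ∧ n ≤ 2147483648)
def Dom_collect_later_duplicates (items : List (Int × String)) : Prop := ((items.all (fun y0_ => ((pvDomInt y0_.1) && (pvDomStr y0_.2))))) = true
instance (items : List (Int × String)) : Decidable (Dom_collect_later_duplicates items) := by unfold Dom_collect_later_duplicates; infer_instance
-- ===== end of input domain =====

-- B replaces A's streaming seen-set with a dict comprehension keeping a pair iff
-- its label occurs in the strict prefix before it (alternative decomposition).

-- ===== PORT A =====
-- seen = set(); duplicates = {}; for index, label in items: …; return duplicates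
def collect_later_duplicates (items : List (Int × String)) : List (Int × String) :=
  (items.foldl
    (fun (st : PySem.Set String × PySem.Dict Int String) p =>
      if st.1.contains p.2 then (st.1, st.2.insert p.1 p.2)
      else (st.1.add p.2, st.2))
    (PySem.Set.empty, PySem.Dict.empty)).2.items

-- ===== PORT B =====
-- {index: label for i, (index, label) in enumerate(items) if any(l == label for _, l in items[:i])}
def collect_later_duplicates_alt (items : List (Int × String)) : List (Int × String) :=
  ((PySem.List.enumerate items).foldl
    (fun (d : PySem.Dict Int String) p =>
      if (PySem.List.slice items none (some p.1)).any (fun q => q.2 == p.2.2)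
      then d.insert p.2.1 p.2.2 else d)
    PySem.Dict.empty).items

-- ===== PRECONDITION & SPEC =====
def Spec_collect_later_duplicates (items : List (Int × String)) (out : List (Int × String)) : Prop := out = collect_later_duplicates_alt items
instance (items : List (Int × String)) (out : List (Int × String)) : Decidable (Spec_collect_later_duplicates items out) := by unfold Spec_collect_later_duplicates; infer_instance

-- ===== CLAIM (what is proved, stated in full; the proofs are below) =====
def Claim_equal_collect_later_duplicates : Prop := ∀ (items : List (Int × String)), Dom_collect_later_duplicates items → Spec_collect_later_duplicates items (collect_later_duplicates items)

-- ===== LEMMAS AND PROOFS =====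

theorem set_ofList_append_singleton (l : List String) (x : String) :
    PySem.Set.ofList (l ++ [x]) = (PySem.Set.ofList l).add x := by
  simp [PySem.Set.ofList_eq_foldl, List.foldl_append]

theorem contains_ofList (l : List String) (x : String) :
    (PySem.Set.ofList (l : List String)).contains x = l.contains x := by
  simp [PySem.Set.contains, PySem.Set.mem_ofList]

-- the generalized loop invariant: A's fold over the remainder, started with the
-- labels of the prefix as its seen-set, matches B's fold over the enumerated remainder
theorem loop_eq (rest pre : List (Int × String)) (d : PySem.Dict Int String) :
    (rest.foldl
      (fun (st : PySem.Set String × PySem.Dict Int String) p =>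
        if st.1.contains p.2 then (st.1, st.2.insert p.1 p.2)
        else (st.1.add p.2, st.2))
      (PySem.Set.ofList (pre.map Prod.snd), d)).2 =
    (PySem.List.enumerate rest (pre.length : Int)).foldl
      (fun (d : PySem.Dict Int String) p =>
        if (PySem.List.slice (pre ++ rest) none (some p.1)).any (fun q => q.2 == p.2.2)
        then d.insert p.2.1 p.2.2 else d) d := by
  induction rest generalizing pre d with
  | nil => simp [PySem.List.enumerate]
  | cons p rs ih =>
    rw [PySem.List.enumerate_cons, List.foldl_cons, List.foldl_cons]
    have hslice : PySem.List.slice (pre ++ p :: rs) none (some (pre.length : Int)) = pre := by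
      rw [PySem.List.slice_to_natCast]
      simp
    have hcond : (PySem.Set.ofList (pre.map Prod.snd)).contains p.2
        = pre.any (fun q => q.2 == p.2) := by
      rw [contains_ofList, Bool.eq_iff_iff, List.contains_iff_mem, List.any_eq_true]
      constructor
      · intro h
        obtain ⟨q, hq, he⟩ := List.mem_map.mp h
        exact ⟨q, hq, by simp [he]⟩
      · intro ⟨q, hq, he⟩
        exact List.mem_map.mpr ⟨q, hq, by simpa using he⟩
    have hpre : pre ++ p :: rs = (pre ++ [p]) ++ rs := by simp
    have hofl : PySem.Set.ofList ((pre ++ [p]).map Prod.snd)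
        = (PySem.Set.ofList (pre.map Prod.snd)).add p.2 := by
      rw [List.map_append]
      exact set_ofList_append_singleton _ _
    have hlen : ((pre ++ [p]).length : Int) = (pre.length : Int) + 1 := by simp
    rw [hslice, hcond]
    by_cases hmem : (pre.any fun q => q.2 == p.2) = true
    · have hct : (PySem.Set.ofList (pre.map Prod.snd)).contains p.2 = true := by
        rw [hcond]; exact hmem
      have hadd : (PySem.Set.ofList (pre.map Prod.snd)).add p.2
          = PySem.Set.ofList (pre.map Prod.snd) := by
        simp only [PySem.Set.add, hct, ite_true]
      simp only [hmem, if_true]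
      have := ih (pre ++ [p]) (d.insert p.1 p.2)
      rw [hofl, hadd, hlen, ← hpre] at this
      exact this
    · rw [Bool.not_eq_true] at hmem
      simp only [hmem, Bool.false_eq_true, if_false]
      have := ih (pre ++ [p]) d
      rw [hofl, hlen, ← hpre] at this
      exact this

-- ===== VERDICT (by name: the statement is the Claim_ definition above) =====
theorem collect_later_duplicates_spec : Claim_equal_collect_later_duplicates := by
  intro items _
  unfold Spec_collect_later_duplicates collect_later_duplicates collect_later_duplicates_alt
  have := loop_eq items [] PySem.Dict.empty
  simpa [PySem.Set.ofList, PySem.Set.empty] using congrArg PySem.Dict.items this
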